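-- pv_equiv track=rewrite | github.com/Charan-013/Coding-ProblemSolving-using-Python | week 8/Day33/Exam/categorize_numbers (handout)/solution.py | categoriseNumbers
-- ===== SOURCE A (Python) =====
-- def categoriseNumbers(d):
--     d1 = {'even': [], 'odd': [], 'positive': [], 'negative': []}
--     for n in d:
--         if n % 2 == 0 or n == 0:
--             d1['even'].append(n)
--         else:
--             d1['odd'].append(n)
--
--         if n < 0:
--             d1['negative'].append(n)
--         elif n > 0:
--             d1['positive'].append(n)
--
--
--     return d1
-- ===== SOURCE B (Python) =====
-- def categoriseNumbers(d):
--     items = list(d)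
--     return {
--         'even': [n for n in items if n % 2 == 0],
--         'odd': [n for n in items if n % 2 != 0],
--         'positive': [n for n in items if n > 0],
--         'negative': [n for n in items if n < 0],
--     }
-- ===== Notes on version B (the rewrite author's own statement) =====
-- stated objective: idiomatic
-- what changed: Replaces A's single branchy loop mutating a dict of four lists with a dict literal built from four independent filtered comprehensions, one per category.
import Mathlib
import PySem

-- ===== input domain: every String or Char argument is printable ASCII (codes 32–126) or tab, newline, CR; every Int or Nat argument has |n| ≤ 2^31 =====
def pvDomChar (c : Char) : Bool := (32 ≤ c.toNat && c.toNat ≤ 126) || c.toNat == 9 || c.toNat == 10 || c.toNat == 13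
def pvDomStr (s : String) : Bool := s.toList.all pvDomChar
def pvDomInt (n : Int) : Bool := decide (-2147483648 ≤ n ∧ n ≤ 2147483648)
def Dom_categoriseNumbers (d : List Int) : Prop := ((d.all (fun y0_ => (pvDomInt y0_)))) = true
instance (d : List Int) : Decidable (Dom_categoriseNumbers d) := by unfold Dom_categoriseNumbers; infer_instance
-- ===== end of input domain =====

-- B builds the returned dict from four independent filtered comprehensions instead of A's single branchy loop (idiomatic decomposition; same O(n) cost).


-- ===== PORT A =====
-- loop body of 'for n in d:' (branch and append into d1), then the fold over d
def catStep (d1 : PySem.Dict String (List Int)) (n : Int) : PySem.Dict String (List Int) :=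
  let d1 :=
    if PySem.Int.mod n 2 = 0 ∨ n = 0 then
      d1.modify "even" [] (· ++ [n])
    else
      d1.modify "odd" [] (· ++ [n])
  if n < 0 then
    d1.modify "negative" [] (· ++ [n])
  else if n > 0 then
    d1.modify "positive" [] (· ++ [n])
  else d1

-- d1 = {'even': [], 'odd': [], 'positive': [], 'negative': []}; for n in d: …; return d1
def categoriseNumbers (d : List Int) : List (String × List Int) :=
  let d1 : PySem.Dict String (List Int) :=
    PySem.Dict.ofList [("even", []), ("odd", []), ("positive", []), ("negative", [])]
  (d.foldl catStep d1).items

-- ===== PORT B =====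
-- four independent filtered comprehensions over the materialised input
def categoriseNumbers_alt (d : List Int) : List (String × List Int) :=
  [ ("even",     d.filter (fun n => PySem.Int.mod n 2 == 0)),
    ("odd",      d.filter (fun n => PySem.Int.mod n 2 != 0)),
    ("positive", d.filter (fun n => n > 0)),
    ("negative", d.filter (fun n => n < 0)) ]

-- ===== PRECONDITION & SPEC =====
def Spec_categoriseNumbers (d : List Int) (out : List (String × List Int)) : Prop := out = categoriseNumbers_alt d
instance (d : List Int) (out : List (String × List Int)) : Decidable (Spec_categoriseNumbers d out) := by unfold Spec_categoriseNumbers; infer_instance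

-- ===== CLAIM (what is proved, stated in full; the proofs are below) =====
def Claim_equal_categoriseNumbers : Prop := ∀ (d : List Int), Dom_categoriseNumbers d → Spec_categoriseNumbers d (categoriseNumbers d)

-- ===== LEMMAS AND PROOFS =====

-- one loop step on the literal four-key dict
theorem catStep_lit (e o p ng : List Int) (n : Int) :
    catStep (PySem.Dict.mk [("even", e), ("odd", o), ("positive", p), ("negative", ng)]) n =
    PySem.Dict.mk
      [ ("even",     e ++ if PySem.Int.mod n 2 == 0 then [n] else []),
        ("odd",      o ++ if PySem.Int.mod n 2 != 0 then [n] else []),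
        ("positive", p ++ if n > 0 then [n] else []),
        ("negative", ng ++ if n < 0 then [n] else []) ] := by
  by_cases hd : (2:Int) ∣ n <;> by_cases hn : n < 0 <;> by_cases hp : n > 0 <;>
    first
    | omega
    | (have hn0 : n ≠ 0 := fun h => hd (h ▸ ⟨0, by ring⟩)
       simp [catStep, PySem.Dict.modify, PySem.Dict.insert, PySem.Dict.getD, PySem.Dict.get?, hd, hn, hp, hn0])
    | simp [catStep, PySem.Dict.modify, PySem.Dict.insert, PySem.Dict.getD, PySem.Dict.get?, hd, hn, hp]

-- loop invariant: the fold appends each element's categories to the four lists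
theorem categoriseNumbers_inv (d : List Int) (e o p ng : List Int) :
    d.foldl catStep (PySem.Dict.mk [("even", e), ("odd", o), ("positive", p), ("negative", ng)]) =
    PySem.Dict.mk
      [ ("even",     e ++ d.filter (fun n => PySem.Int.mod n 2 == 0)),
        ("odd",      o ++ d.filter (fun n => PySem.Int.mod n 2 != 0)),
        ("positive", p ++ d.filter (fun n => n > 0)),
        ("negative", ng ++ d.filter (fun n => n < 0)) ] := by
  induction d generalizing e o p ng with
  | nil => simp
  | cons n rest ih =>
    rw [List.foldl_cons, catStep_lit, ih]
    simp [List.filter_cons]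
    constructor <;> [skip; constructor] <;> [skip; skip; constructor] <;>
      split <;> simp

-- ===== VERDICT (by name: the statement is the Claim_ definition above) =====
theorem categoriseNumbers_spec : Claim_equal_categoriseNumbers := by
  intro d _
  unfold Spec_categoriseNumbers categoriseNumbers categoriseNumbers_alt
  simp only [PySem.Dict.ofList]
  rw [show PySem.Dict.update PySem.Dict.empty [("even", ([] : List Int)), ("odd", []), ("positive", []), ("negative", [])] = PySem.Dict.mk [("even", []), ("odd", []), ("positive", []), ("negative", [])] from by decide]
  rw [categoriseNumbers_inv]
  simp
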